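-- pv_equiv track=rewrite | github.com/MDQUE/Project | Gui.py | clear_for_comments
-- ===== SOURCE A (Python) =====
-- def clear_for_comments(stringie):
-- 		clean_string = ''
-- 		unprocessed_string = stringie
-- 		while(1):
-- 				if unprocessed_string.find('(') != -1:
-- 						i = unprocessed_string.find('(')
-- 						x = unprocessed_string.find(')', i)
-- 						if unprocessed_string.find('\n', i, x) != -1:
-- 								clean_string += unprocessed_string[0:i]+'\n'
-- 								unprocessed_string = unprocessed_string[x+1:]
-- 						else:
-- 								clean_string += unprocessed_string[0:i]
-- 								unprocessed_string = unprocessed_string[x+1:]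
-- 				else:
-- 						clean_string += unprocessed_string
-- 						break
-- 		retext = ''
-- 		for line in clean_string.splitlines():
-- 				freeline = (line + '.')[:-1]
-- 				freeline.strip(' \r')
-- 				try:
-- 						if freeline[0] == '\n':
-- 								continue
-- 						else:
-- 								retext += line + '\n'
-- 				except:
-- 						continue
-- 		clean_string = retext
-- 		return clean_string
-- ===== SOURCE B (Python) =====
-- def clear_for_comments(stringie):
--     # One linear scan: copy characters outside parenthesized spans; a span runs
--     # from a '(' to the first following ')' and is replaced by '\n' iff it
--     # contains a newline. Then drop empty lines in one pass.
--     out = []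
--     in_comment = False
--     saw_nl = False
--     for ch in stringie:
--         if in_comment:
--             if ch == ')':
--                 in_comment = False
--                 if saw_nl:
--                     out.append('\n')
--             elif ch == '\n':
--                 saw_nl = True
--         else:
--             if ch == '(':
--                 in_comment = True
--                 saw_nl = False
--             else:
--                 out.append(ch)
--     clean = ''.join(out)
--     return ''.join(line + '\n' for line in clean.splitlines() if line)
-- ===== Notes on version B (the rewrite author's own statement) =====
-- stated objective: alternative
-- what changed: A repeatedly re-scans the remaining string with find() and rebuilds it by slicing, once per parenthesized span (quadratic in the number of spans); B makes one linear pass with an in-comment flag collecting kept characters, then drops empty lines in one pass.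
-- outside the precondition, e.g. on clear_for_comments('('): A does not finish within the time limit, B returns ''
import Mathlib
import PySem

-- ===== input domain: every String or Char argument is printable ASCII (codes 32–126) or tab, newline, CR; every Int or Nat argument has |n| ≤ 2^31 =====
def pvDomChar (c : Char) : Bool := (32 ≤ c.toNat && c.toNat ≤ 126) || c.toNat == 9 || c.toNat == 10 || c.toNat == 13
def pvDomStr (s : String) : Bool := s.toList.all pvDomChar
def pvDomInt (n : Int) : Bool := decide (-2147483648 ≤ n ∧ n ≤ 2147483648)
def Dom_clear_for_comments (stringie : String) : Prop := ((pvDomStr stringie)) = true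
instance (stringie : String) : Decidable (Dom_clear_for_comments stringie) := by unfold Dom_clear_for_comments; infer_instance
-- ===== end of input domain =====

-- B replaces A's repeated find/slice passes (one per parenthesized span) by a
-- single linear scan with an in-comment flag, plus a one-pass empty-line filter.

-- ===== PORT A =====
-- A's 'while(1)' loop; 'fuel' only makes the recursion total (it strictly
-- exceeds the iteration count on every input satisfying Pre_).
def pvALoop (fuel : Nat) (clean unproc : List Char) : List Char :=
  match fuel with
  | 0 => clean ++ unproc
  | fuel + 1 =>
    if PySem.Chars.find unproc ['('] ≠ -1 then
      let i := PySem.Chars.find unproc ['(']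
      let x := PySem.Chars.findFrom unproc [')'] i
      if PySem.Chars.findFrom unproc ['\n'] i (some x) ≠ -1 then
        pvALoop fuel (clean ++ PySem.List.slice unproc (some 0) (some i) ++ ['\n'])
          (PySem.List.slice unproc (some (x + 1)) none)
      else
        pvALoop fuel (clean ++ PySem.List.slice unproc (some 0) (some i))
          (PySem.List.slice unproc (some (x + 1)) none)
    else clean ++ unproc

-- A's second loop over clean_string.splitlines()
def pvAPhase2 (lines : List (List Char)) : List Char :=
  lines.foldl (fun retext line =>
    let freeline := PySem.List.slice (line ++ ['.']) none (some (-1))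
    let _ := PySem.Chars.stripChars freeline [' ', '\r']   -- computed and discarded by A
    match PySem.List.pyGet? freeline 0 with
    | none => retext                                        -- IndexError → except: continue
    | some c => if c = '\n' then retext else retext ++ line ++ ['\n']) []

def clear_for_comments (stringie : String) : String :=
  String.ofList (pvAPhase2 (PySem.Chars.splitlines (pvALoop (stringie.toList.length + 1) [] stringie.toList)))

-- ===== PORT B =====
def pvBStep (st : List Char × Bool × Bool) (ch : Char) : List Char × Bool × Bool :=
  if st.2.1 then
    if ch = ')' then (if st.2.2 then st.1 ++ ['\n'] else st.1, false, st.2.2)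
    else if ch = '\n' then (st.1, true, true)
    else st
  else
    if ch = '(' then (st.1, true, false)
    else (st.1 ++ [ch], false, st.2.2)

def clear_for_comments_alt (stringie : String) : String :=
  let clean := (stringie.toList.foldl pvBStep ([], false, false)).1
  String.ofList (((PySem.Chars.splitlines clean).filter (fun l => !l.isEmpty)).flatMap (fun l => l ++ ['\n']))

-- ===== PRECONDITION & SPEC =====
-- Pre_ excludes exactly the inputs containing a '(' with no ')' after it:
-- there A's while-loop never terminates (unprocessed_string[x+1:] with x = -1
-- is the whole string again), so A returns on no such input.
def Pre_clear_for_comments (stringie : String) : Prop :=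
  ∀ i, i < stringie.toList.length → stringie.toList[i]? = some '(' →
    ∃ j, j < stringie.toList.length ∧ i < j ∧ stringie.toList[j]? = some ')'
instance (stringie : String) : Decidable (Pre_clear_for_comments stringie) := by
  unfold Pre_clear_for_comments; infer_instance

def pvWitness_clear_for_comments : String := "a(b)c\n\nd"

def Spec_clear_for_comments (stringie : String) (out : String) : Prop := out = clear_for_comments_alt stringie
instance (stringie : String) (out : String) : Decidable (Spec_clear_for_comments stringie out) := by unfold Spec_clear_for_comments; infer_instance

-- ===== CLAIM (what is proved, stated in full; the proofs are below) =====
def Claim_equal_clear_for_comments : Prop := ∀ (stringie : String), Dom_clear_for_comments stringie → Pre_clear_for_comments stringie → Spec_clear_for_comments stringie (clear_for_comments stringie)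

-- ===== LEMMAS AND PROOFS =====

-- Pre_, on a plain list
def pvP (cs : List Char) : Prop :=
  ∀ i, i < cs.length → cs[i]? = some '(' → ∃ j, j < cs.length ∧ i < j ∧ cs[j]? = some ')'

lemma pvP_drop (cs : List Char) (k : Nat) (h : pvP cs) : pvP (cs.drop k) := by
  intro i hi hg
  rw [List.length_drop] at hi
  rw [List.getElem?_drop] at hg
  have hki : k + i < cs.length := by
    have := List.getElem?_eq_some_iff.mp hg; omega
  obtain ⟨j, hj, hij, hj'⟩ := h (k + i) hki hg
  refine ⟨j - k, by rw [List.length_drop]; omega, by omega, ?_⟩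
  rw [List.getElem?_drop]
  have : k + (j - k) = j := by omega
  rw [this]; exact hj'

-- the pure state machine B's fold computes
mutual
def pvN : List Char → List Char
  | [] => []
  | c :: rest => if c = '(' then pvC false rest else c :: pvN rest
def pvC : Bool → List Char → List Char
  | _, [] => []
  | saw, c :: rest =>
    if c = ')' then (if saw then '\n' :: pvN rest else pvN rest)
    else if c = '\n' then pvC true rest
    else pvC saw rest
end

lemma pvFold (cs : List Char) : ∀ out inC saw,
    (cs.foldl pvBStep (out, inC, saw)).1 = out ++ (if inC then pvC saw cs else pvN cs) := by
  induction cs with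
  | nil => intro out inC saw; cases inC <;> simp [pvN, pvC]
  | cons c rest ih =>
    intro out inC saw
    simp only [List.foldl_cons]
    cases inC with
    | false =>
      by_cases hc : c = '('
      · simp [pvBStep, hc, ih, pvN]
      · simp [pvBStep, hc, ih, pvN]
    | true =>
      by_cases hc : c = ')'
      · cases saw <;> simp [pvBStep, hc, ih, pvC]
      · by_cases hn : c = '\n'
        · simp [pvBStep, hn, ih, pvC]
        · simp [pvBStep, hc, hn, ih, pvC]

lemma pvN_no_paren (cs : List Char) (h : '(' ∉ cs) : pvN cs = cs := by
  induction cs with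
  | nil => rfl
  | cons c rest ih =>
    simp only [List.mem_cons, not_or] at h
    have hc : c ≠ '(' := fun hcc => h.1 hcc.symm
    simp [pvN, hc, ih h.2]

lemma pvN_append (pre cs : List Char) (h : '(' ∉ pre) : pvN (pre ++ cs) = pre ++ pvN cs := by
  induction pre with
  | nil => rfl
  | cons c rest ih =>
    simp only [List.mem_cons, not_or] at h
    have hc : c ≠ '(' := fun hcc => h.1 hcc.symm
    simp [pvN, hc, ih h.2]

lemma pvC_no_close (mid rest : List Char) (saw : Bool) (h : ')' ∉ mid) :
    pvC saw (mid ++ ')' :: rest) =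
      (if saw = true ∨ '\n' ∈ mid then '\n' :: pvN rest else pvN rest) := by
  induction mid generalizing saw with
  | nil => cases saw <;> simp [pvC]
  | cons c m ih =>
    simp only [List.mem_cons, not_or] at h
    have hc : c ≠ ')' := fun hcc => h.1 hcc.symm
    by_cases hn : c = '\n'
    · simp [pvC, hn, ih _ h.2]
    · have hm : ('\n' ∈ c :: m) ↔ ('\n' ∈ m) := by
        constructor
        · intro hh
          rcases List.mem_cons.mp hh with h1 | h1
          · exact absurd h1.symm hn
          · exact h1
        · exact fun hh => List.mem_cons_of_mem _ hh
      simp [pvC, hc, hn, ih _ h.2, hm]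

-- singleton infix/prefix characterisations
lemma pv_singleton_infix (c : Char) (l : List Char) : [c] <:+: l ↔ c ∈ l := by
  constructor
  · intro h; exact h.mem (by simp)
  · intro h
    obtain ⟨p, q, rfl⟩ := List.append_of_mem h
    exact ⟨p, q, by simp⟩

lemma pv_singleton_prefix (c : Char) (l : List Char) : [c] <+: l ↔ l.head? = some c := by
  cases l with
  | nil => simp
  | cons a t => simp [List.cons_prefix_cons]; exact eq_comm

-- find(sub, i, x) ≠ -1  ↔  the character occurs in the slice [i, x)
lemma pvFindFromEnd (cs : List Char) (c : Char) (i x : Nat)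
    (hix : i ≤ x) (hx : x ≤ cs.length) :
    (PySem.Chars.findFrom cs [c] (i : Int) (some (x : Int)) ≠ -1) ↔ c ∈ (cs.take x).drop i := by
  have h1 : ¬ ((cs.length : Int) < (x : Int)) := by exact_mod_cast not_lt.mpr hx
  have h2 : ¬ ((x : Int) < 0) := by omega
  have h3 : ¬ ((i : Int) < 0) := by omega
  have h4 : ¬ ((x : Int) < (i : Int)) := by exact_mod_cast not_lt.mpr hix
  simp only [PySem.Chars.findFrom, h1, h2, h3, h4, if_false, Int.toNat_natCast]
  set seg := (cs.take x).drop i with hseg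
  by_cases hr : PySem.Chars.find seg [c] = -1
  · simp only [hr, if_true]
    constructor
    · intro h; exact absurd rfl h
    · intro hmem _
      exact (PySem.Chars.find_ne_neg_one_iff seg [c]).mpr ((pv_singleton_infix c seg).mpr hmem) hr
  · rw [if_neg hr]
    have hr0 : 0 ≤ PySem.Chars.find seg [c] := by
      have := PySem.Chars.neg_one_le_find seg [c]
      omega
    constructor
    · intro _
      exact (pv_singleton_infix c seg).mp ((PySem.Chars.find_ne_neg_one_iff seg [c]).mp hr)
    · intro _
      omega

-- A's loop computes the state machine's output
lemma pvA_eq : ∀ fuel (cs acc : List Char), pvP cs → cs.length < fuel →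
    pvALoop fuel acc cs = acc ++ pvN cs := by
  intro fuel
  induction fuel with
  | zero => intro cs acc _ h; omega
  | succ fuel ih =>
    intro cs acc hP hlen
    rw [pvALoop]
    by_cases hf : PySem.Chars.find cs ['('] = -1
    · rw [if_neg (by simp [hf])]
      have hmem : '(' ∉ cs := by
        intro hmem
        exact (PySem.Chars.find_ne_neg_one_iff cs ['(']).mpr
          ((pv_singleton_infix '(' cs).mpr hmem) hf
      rw [pvN_no_paren cs hmem]
    · -- reduce the step to its explicit form
      rw [if_pos hf]
      show (if PySem.Chars.findFrom cs ['\n'] (PySem.Chars.find cs ['('])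
              (some (PySem.Chars.findFrom cs [')'] (PySem.Chars.find cs ['(']))) ≠ -1 then
          pvALoop fuel (acc ++ PySem.List.slice cs (some 0) (some (PySem.Chars.find cs ['('])) ++ ['\n'])
            (PySem.List.slice cs (some (PySem.Chars.findFrom cs [')'] (PySem.Chars.find cs ['(']) + 1)) none)
        else
          pvALoop fuel (acc ++ PySem.List.slice cs (some 0) (some (PySem.Chars.find cs ['('])))
            (PySem.List.slice cs (some (PySem.Chars.findFrom cs [')'] (PySem.Chars.find cs ['(']) + 1)) none))
        = acc ++ pvN cs
      have h0 : 0 ≤ PySem.Chars.find cs ['('] := by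
        have := PySem.Chars.neg_one_le_find cs ['(']
        omega
      obtain ⟨hpre, hmin⟩ := PySem.Chars.find_spec (s := cs) (sub := ['(']) h0
      obtain ⟨i', hicast⟩ : ∃ n : Nat, PySem.Chars.find cs ['('] = (n : Int) :=
        ⟨_, (Int.toNat_of_nonneg h0).symm⟩
      rw [hicast] at hpre hmin ⊢
      rw [Int.toNat_natCast] at hpre hmin
      have hgi : cs[i']? = some '(' := by
        rw [← List.head?_drop]
        exact (pv_singleton_prefix _ _).mp hpre
      have hi'len : i' < cs.length := by
        obtain ⟨h, -⟩ := List.getElem?_eq_some_iff.mp hgi; omega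
      obtain ⟨j, hjlen, hij, hgj⟩ := hP i' hi'len hgi
      have hjmem : ')' ∈ cs.drop i' := by
        rw [List.mem_iff_getElem?]
        exact ⟨j - i', by rw [List.getElem?_drop]; rw [show i' + (j - i') = j by omega]; exact hgj⟩
      have hxne : PySem.Chars.findFrom cs [')'] (i' : Int) ≠ -1 := by
        intro hh
        exact ((PySem.Chars.findFrom_natCast_eq_neg_one_iff cs [')'] i' (le_of_lt hi'len)).mp hh)
          ((pv_singleton_infix _ _).mpr hjmem)
      obtain ⟨hxle, hxpre, hxmin⟩ :=
        PySem.Chars.findFrom_natCast_spec cs [')'] i' (le_of_lt hi'len) hxne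
      have hx0 : 0 ≤ PySem.Chars.findFrom cs [')'] (i' : Int) := by omega
      obtain ⟨x', hxcast⟩ : ∃ n : Nat, PySem.Chars.findFrom cs [')'] (i' : Int) = (n : Int) :=
        ⟨_, (Int.toNat_of_nonneg hx0).symm⟩
      rw [hxcast] at hxle hxpre hxmin ⊢
      rw [Int.toNat_natCast] at hxpre hxmin
      have hgx : cs[x']? = some ')' := by
        rw [← List.head?_drop]
        exact (pv_singleton_prefix _ _).mp hxpre
      have hx'len : x' < cs.length := by
        obtain ⟨h, -⟩ := List.getElem?_eq_some_iff.mp hgx; omega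
      have hii'x' : i' < x' := by
        rcases Nat.lt_or_ge i' x' with h | h
        · exact h
        · have hle : i' = x' := by omega
          rw [hle] at hgi
          rw [hgi] at hgx
          simp at hgx
      -- decomposition of cs around the first '(' and the first ')' after it
      have hdropi : cs.drop i' = '(' :: cs.drop (i' + 1) := by
        rw [List.drop_eq_getElem_cons hi'len]
        congr 1
        have := List.getElem?_eq_getElem (l := cs) (i := i') hi'len
        rw [this] at hgi; exact Option.some.inj hgi
      have hdropx : cs.drop x' = ')' :: cs.drop (x' + 1) := by
        rw [List.drop_eq_getElem_cons hx'len]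
        congr 1
        have := List.getElem?_eq_getElem (l := cs) (i := x') hx'len
        rw [this] at hgx; exact Option.some.inj hgx
      have hdropi1 : cs.drop (i' + 1) =
          (cs.drop (i' + 1)).take (x' - (i' + 1)) ++ ')' :: cs.drop (x' + 1) := by
        conv_lhs => rw [← List.take_append_drop (x' - (i' + 1)) (cs.drop (i' + 1))]
        rw [List.drop_drop, show i' + 1 + (x' - (i' + 1)) = x' by omega, hdropx]
      have hnopre : '(' ∉ cs.take i' := by
        intro hmem
        obtain ⟨t, hget⟩ := List.mem_iff_getElem?.mp hmem
        rw [List.getElem?_take] at hget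
        by_cases htlt : t < i'
        · rw [if_pos htlt] at hget
          exact hmin t htlt ((pv_singleton_prefix _ _).mpr (by rw [List.head?_drop]; exact hget))
        · rw [if_neg htlt] at hget; simp at hget
      have hnomid : ')' ∉ (cs.drop (i' + 1)).take (x' - (i' + 1)) := by
        intro hmem
        obtain ⟨t, hget⟩ := List.mem_iff_getElem?.mp hmem
        rw [List.getElem?_take] at hget
        by_cases htlt : t < x' - (i' + 1)
        · rw [if_pos htlt] at hget
          rw [List.getElem?_drop] at hget
          exact hxmin (i' + 1 + t) (by omega) (by omega)
            ((pv_singleton_prefix _ _).mpr (by rw [List.head?_drop]; exact hget))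
        · rw [if_neg htlt] at hget; simp at hget
      have hdec : cs = cs.take i' ++
          '(' :: ((cs.drop (i' + 1)).take (x' - (i' + 1)) ++ ')' :: cs.drop (x' + 1)) := by
        conv_lhs => rw [← List.take_append_drop i' cs]
        rw [hdropi, ← hdropi1]
      -- slices
      have hs0 : PySem.List.slice cs (some 0) (some ((i' : Nat) : Int)) = cs.take i' := by
        rw [PySem.List.slice_zero_start, PySem.List.slice_to_natCast]
      have hsx : PySem.List.slice cs (some (((x' : Nat) : Int) + 1)) none = cs.drop (x' + 1) := by
        rw [show ((x' : Nat) : Int) + 1 = ((x' + 1 : Nat) : Int) by omega, PySem.List.slice_from_natCast]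
      -- the newline test reads exactly the removed span
      have htakedrop : (cs.take x').drop i' = '(' :: (cs.drop (i' + 1)).take (x' - (i' + 1)) := by
        rw [List.drop_take, hdropi, List.take_cons (by omega)]
        congr 1
      have hnliff : (PySem.Chars.findFrom cs ['\n'] ((i' : Nat) : Int) (some ((x' : Nat) : Int)) ≠ -1) ↔
          '\n' ∈ (cs.drop (i' + 1)).take (x' - (i' + 1)) := by
        rw [pvFindFromEnd cs '\n' i' x' (by omega) (by omega), htakedrop]
        simp [List.mem_cons]
      -- the state machine on the decomposed string
      have hpvN : pvN cs = cs.take i' ++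
          (if '\n' ∈ (cs.drop (i' + 1)).take (x' - (i' + 1)) then '\n' :: pvN (cs.drop (x' + 1))
           else pvN (cs.drop (x' + 1))) := by
        conv_lhs => rw [hdec]
        rw [pvN_append _ _ hnopre, pvN, if_pos rfl, pvC_no_close _ _ false hnomid]
        simp
      have hPrest : pvP (cs.drop (x' + 1)) := pvP_drop cs (x' + 1) hP
      have hlenrest : (cs.drop (x' + 1)).length < fuel := by
        rw [List.length_drop]
        omega
      by_cases hnl : PySem.Chars.findFrom cs ['\n'] ((i' : Nat) : Int) (some ((x' : Nat) : Int)) ≠ -1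
      · rw [if_pos hnl, hs0, hsx, ih _ _ hPrest hlenrest, hpvN, if_pos (hnliff.mp hnl)]
        simp
      · rw [if_neg hnl, hs0, hsx, ih _ _ hPrest hlenrest, hpvN,
          if_neg (fun hh => hnl (hnliff.mpr hh))]
        simp

-- splitlines lines contain no break characters
lemma pv_go_inv (isB : Char → Bool) (s cur : List Char) (acc : List (List Char)) :
    (∀ l ∈ acc, ∀ c ∈ l, isB c = false) →
    (∀ c ∈ cur, isB c = false) →
    ∀ l ∈ PySem.Chars.splitlines.go isB s cur acc, ∀ c ∈ l, isB c = false := by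
  fun_induction PySem.Chars.splitlines.go isB s cur acc with
  | case1 =>
    intro hacc hcur l hl
    exact hacc l (List.mem_reverse.mp hl)
  | case2 =>
    intro hacc hcur l hl
    rcases List.mem_cons.mp (List.mem_reverse.mp hl) with h1 | h1
    · subst h1; intro c hc; exact hcur c (List.mem_reverse.mp hc)
    · exact hacc l h1
  | case3 _ _ _ ih =>
    intro hacc hcur
    refine ih ?_ (by simp)
    intro l hl
    rcases List.mem_cons.mp hl with h1 | h1
    · subst h1; intro c hc; exact hcur c (List.mem_reverse.mp hc)
    · exact hacc l h1
  | case4 _ _ _ _ _ hB ih =>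
    intro hacc hcur
    refine ih ?_ (by simp)
    intro l hl
    rcases List.mem_cons.mp hl with h1 | h1
    · subst h1; intro c hc; exact hcur c (List.mem_reverse.mp hc)
    · exact hacc l h1
  | case5 _ _ _ _ _ hB ih =>
    intro hacc hcur
    refine ih hacc ?_
    intro d hd
    rcases List.mem_cons.mp hd with h1 | h1
    · subst h1; simpa using hB
    · exact hcur d h1

lemma pv_splitlines_no_nl (cs : List Char) :
    ∀ l ∈ PySem.Chars.splitlines cs, '\n' ∉ l := by
  intro l hl hmem
  unfold PySem.Chars.splitlines at hl
  have := pv_go_inv _ cs [] [] (by simp) (by simp) l hl '\n' hmem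
  simp at this

lemma pv_pyGet_nil : PySem.List.pyGet? ([] : List Char) 0 = none := by
  simp [PySem.List.pyGet?, PySem.List.pyIdx?]

lemma pv_fold_clean : ∀ (lines : List (List Char)) (acc : List Char),
    lines.foldl (fun acc l => if l.isEmpty then acc else acc ++ (l ++ ['\n'])) acc
      = acc ++ (lines.filter (fun l => !l.isEmpty)).flatMap (fun l => l ++ ['\n']) := by
  intro lines
  induction lines with
  | nil => intro acc; simp
  | cons l rest ih =>
    intro acc
    rw [List.foldl_cons]
    by_cases hl : l.isEmpty
    · rw [if_pos hl, ih]
      simp [hl]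
    · rw [if_neg hl, ih]
      simp [hl, List.append_assoc]

lemma pvPhase2_go (lines : List (List Char)) (h : ∀ l ∈ lines, '\n' ∉ l) (acc : List Char) :
    lines.foldl (fun retext line =>
      let freeline := PySem.List.slice (line ++ ['.']) none (some (-1))
      let _ := PySem.Chars.stripChars freeline [' ', '\r']
      match PySem.List.pyGet? freeline 0 with
      | none => retext
      | some c => if c = '\n' then retext else retext ++ line ++ ['\n']) acc
    = acc ++ (lines.filter (fun l => !l.isEmpty)).flatMap (fun l => l ++ ['\n']) := by
  have hg : ∀ line ∈ lines, ∀ retext : List Char,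
      (fun retext line =>
        let freeline := PySem.List.slice (line ++ ['.']) none (some (-1))
        let _ := PySem.Chars.stripChars freeline [' ', '\r']
        match PySem.List.pyGet? freeline 0 with
        | none => retext
        | some c => if c = '\n' then retext else retext ++ line ++ ['\n']) retext line
      = (fun acc l => if l.isEmpty then acc else acc ++ (l ++ ['\n'])) retext line := by
    intro line hline retext
    have hfree : PySem.List.slice (line ++ ['.']) none (some (-1)) = line := by
      rw [PySem.List.slice_to_neg_one]; exact List.dropLast_concat
    simp only [hfree]
    cases line with
    | nil => simp [pv_pyGet_nil]
    | cons c t =>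
      have hc : c ≠ '\n' := fun hc => h (c :: t) hline (hc ▸ List.mem_cons_self)
      simp [hc]
  exact Eq.trans (PySem.List.foldl_congr_mem' lines _ _ acc hg) (pv_fold_clean lines acc)

lemma pvPhase2_eq (lines : List (List Char)) (h : ∀ l ∈ lines, '\n' ∉ l) :
    pvAPhase2 lines = (lines.filter (fun l => !l.isEmpty)).flatMap (fun l => l ++ ['\n']) := by
  have := pvPhase2_go lines h []
  simpa [pvAPhase2] using this

-- ===== VERDICT (by name: the statement is the Claim_ definition above) =====
theorem clear_for_comments_spec : Claim_equal_clear_for_comments := by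
  intro s _hD hP
  unfold Spec_clear_for_comments clear_for_comments clear_for_comments_alt
  have h1 : pvALoop (s.toList.length + 1) [] s.toList = pvN s.toList :=
    pvA_eq _ _ _ hP (by omega)
  have h2 : (s.toList.foldl pvBStep ([], false, false)).1 = pvN s.toList := by
    simpa using pvFold s.toList [] false false
  rw [h1, h2]
  exact congrArg String.ofList (pvPhase2_eq _ (pv_splitlines_no_nl _))
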